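-- pv_equiv track=rewrite | github.com/PDinesen/AdventofCode2019 | AoC4.py | CheckCritiria2
-- ===== SOURCE A (Python) =====
-- def CheckCritiria2(input):
--     temp = str(input)
--     Increasing = True
--     Double = False
--     for i in range(len(temp)-1):
--         if temp[i] > temp[i+1]:
--             Increasing = False
--     if Increasing:
--         for i in temp:
--             if temp.count(i) == 2:
--                 Double = True
--     if Increasing and Double:
--         return True
--     else:
--         return False
-- ===== SOURCE B (Python) =====
-- def CheckCritiria2(input):
--     s = str(input)
--     pairs = list(zip(s, s[1:]))
--     if not all(a <= b for a, b in pairs):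
--         return False
--     # one pass over runs of equal digits (a non-decreasing string keeps equal digits adjacent)
--     run = 1
--     double = False
--     for a, b in pairs:
--         if a == b:
--             run += 1
--         else:
--             if run == 2:
--                 double = True
--             run = 1
--     return double or run == 2
-- ===== Notes on version B (the rewrite author's own statement) =====
-- stated objective: alternative
-- what changed: Replaces the per-character temp.count scan (quadratic in the digit string) with a single pass over consecutive equal-digit runs, valid because a non-decreasing string keeps equal characters adjacent, so a run length equals the total count.
import Mathlib
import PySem

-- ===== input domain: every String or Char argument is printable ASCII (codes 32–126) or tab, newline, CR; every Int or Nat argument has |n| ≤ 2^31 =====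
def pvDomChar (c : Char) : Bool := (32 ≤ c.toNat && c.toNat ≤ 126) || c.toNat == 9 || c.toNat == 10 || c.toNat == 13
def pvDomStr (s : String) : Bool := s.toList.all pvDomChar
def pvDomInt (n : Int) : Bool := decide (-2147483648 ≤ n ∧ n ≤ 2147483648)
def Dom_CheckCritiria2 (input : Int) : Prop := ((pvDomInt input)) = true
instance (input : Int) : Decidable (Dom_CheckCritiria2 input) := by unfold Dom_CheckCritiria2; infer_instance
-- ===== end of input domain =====

-- B replaces A's per-character `temp.count(c)` scan with a single pass over runs of equal
-- adjacent characters (valid since a non-decreasing string keeps equal characters adjacent).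

-- ===== PORT A =====
def CheckCritiria2 (input : Int) : Bool :=
  let temp := PySem.Int.toChars input            -- str(input), as its character list
  let increasing := (PySem.List.pyRange 0 ((temp.length : Int) - 1) 1).foldl
    (fun inc i =>
      if PySem.List.pyGetD temp i ' ' > PySem.List.pyGetD temp (i + 1) ' ' then false else inc)
    true
  let double :=
    if increasing then
      temp.foldl (fun d c => if temp.count c == 2 then true else d) false
    else false
  if increasing && double then true else false

-- ===== PORT B =====
def CheckCritiria2_alt (input : Int) : Bool :=
  let s := PySem.Int.toChars input               -- str(input), as its character list
  let pairs := s.zip (s.drop 1)                  -- list(zip(s, s[1:]))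
  if !(pairs.all fun p => p.1 ≤ p.2) then false
  else
    let st := pairs.foldl
      (fun (st : Nat × Bool) p =>
        if p.1 == p.2 then (st.1 + 1, st.2)
        else (1, st.2 || (st.1 == 2)))
      (1, false)
    st.2 || (st.1 == 2)

-- ===== PRECONDITION & SPEC =====
def Spec_CheckCritiria2 (input : Int) (out : Bool) : Prop := out = CheckCritiria2_alt input
instance (input : Int) (out : Bool) : Decidable (Spec_CheckCritiria2 input out) := by unfold Spec_CheckCritiria2; infer_instance

-- ===== CLAIM (what is proved, stated in full; the proofs are below) =====
def Claim_equal_CheckCritiria2 : Prop := ∀ (input : Int), Dom_CheckCritiria2 input → Spec_CheckCritiria2 input (CheckCritiria2 input)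

-- ===== LEMMAS AND PROOFS =====

-- "some character occurs exactly twice", the condition A's inner loop tests
def anyTwice (m : List Char) : Bool := m.any fun c => m.count c == 2

-- A's "set the flag to false" loop is an `all` of the negated tests.
theorem foldl_if_false {α : Type} (q : α → Prop) [DecidablePred q] (L : List α) (b : Bool) :
    L.foldl (fun inc i => if q i then false else inc) b = (b && L.all fun i => !decide (q i)) := by
  induction L generalizing b with
  | nil => simp
  | cons a t ih =>
    simp only [List.foldl_cons, List.all_cons, ih]
    by_cases h : q a <;> simp [h]

-- A's "set the flag to true" loop is an `any`.
theorem foldl_if_true {α : Type} (q : α → Bool) (L : List α) (b : Bool) :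
    L.foldl (fun d i => if q i then true else d) b = (b || L.any q) := by
  induction L generalizing b with
  | nil => simp
  | cons a t ih =>
    simp only [List.foldl_cons, List.any_cons, ih]
    cases h : q a <;> simp [h]

-- A's index-based adjacent test says the list is non-decreasing.
theorem index_all_iff_chain (s : List Char) :
    ((PySem.List.pyRange 0 ((s.length : Int) - 1) 1).all fun i =>
        !decide (PySem.List.pyGetD s (i + 1) ' ' < PySem.List.pyGetD s i ' ')) = true ↔
      List.IsChain (· ≤ ·) s := by
  rw [PySem.List.pyRange_one, List.isChain_iff_getElem]
  simp only [List.all_map, List.all_eq_true, List.mem_range, Int.sub_zero, Function.comp,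
    zero_add, Bool.not_eq_eq_eq_not, Bool.not_true, decide_eq_false_iff_not, not_lt]
  have e : ∀ k : ℕ, k < s.length →
      PySem.List.pyGetD s (k : Int) ' ' = s.getD k ' ' := by
    intro k _; rw [PySem.List.pyGetD_natCast]
  constructor
  · intro h i hi
    have := h i (by omega)
    rw [show ((i : Int) + 1) = ((i + 1 : ℕ) : Int) by push_cast; ring] at this
    rw [e _ (by omega), e _ (by omega)] at this
    rwa [List.getD_eq_getElem s ' ' (by omega), List.getD_eq_getElem s ' ' (by omega)] at this
  · intro h k hk
    rw [show ((k : Int) + 1) = ((k + 1 : ℕ) : Int) by push_cast; ring,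
      e _ (by omega), e _ (by omega),
      List.getD_eq_getElem s ' ' (by omega), List.getD_eq_getElem s ' ' (by omega)]
    exact h k (by omega)

-- helper for the zip-based test, shaped for induction
theorem zipall_aux (t : List Char) (a : Char) :
    (((a :: t).zip t).all fun p => p.1 ≤ p.2) = true ↔ List.IsChain (· ≤ ·) (a :: t) := by
  induction t generalizing a with
  | nil => simp
  | cons b u ih => simp [List.isChain_cons_cons, ih]

-- B's zip-based test says the list is non-decreasing.
theorem zip_all_iff_chain (s : List Char) :
    ((s.zip (s.drop 1)).all fun p => p.1 ≤ p.2) = true ↔ List.IsChain (· ≤ ·) s := by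
  cases s with
  | nil => simp
  | cons a t => exact zipall_aux t a

-- the two non-decreasing tests agree
theorem index_all_eq_zip_all (s : List Char) :
    ((PySem.List.pyRange 0 ((s.length : Int) - 1) 1).all fun i =>
        !decide (PySem.List.pyGetD s (i + 1) ' ' < PySem.List.pyGetD s i ' ')) =
      ((s.zip (s.drop 1)).all fun p => p.1 ≤ p.2) := by
  rw [Bool.eq_iff_iff, index_all_iff_chain, zip_all_iff_chain]

-- counting in a run-prefixed list, when every later character is strictly larger
theorem anyTwice_append_run (run : Nat) (prev : Char) (bs : List Char)
    (hlt : ∀ x ∈ bs, prev < x) :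
    anyTwice (List.replicate run prev ++ bs) = ((run == 2) || anyTwice bs) := by
  have hnm : prev ∉ bs := fun h => lt_irrefl prev (hlt prev h)
  rw [Bool.eq_iff_iff]
  unfold anyTwice
  simp only [List.any_eq_true, List.mem_append, List.count_append, beq_iff_eq,
    List.mem_replicate, Bool.or_eq_true]
  constructor
  · rintro ⟨x, hx | hx, hcnt⟩
    · obtain ⟨-, rfl⟩ := hx
      rw [List.count_replicate_self, List.count_eq_zero_of_not_mem hnm] at hcnt
      left; omega
    · have hne : prev ≠ x := fun h => by subst h; exact absurd hx hnm
      right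
      refine ⟨x, hx, ?_⟩
      simpa [List.count_replicate, hne] using hcnt
  · rintro (h2 | ⟨x, hx, hcnt⟩)
    · refine ⟨prev, Or.inl ⟨by omega, rfl⟩, ?_⟩
      rw [List.count_replicate_self, List.count_eq_zero_of_not_mem hnm]
      omega
    · have hne : prev ≠ x := fun h => by subst h; exact absurd hx hnm
      refine ⟨x, Or.inr hx, ?_⟩
      simpa [List.count_replicate, hne] using hcnt

-- Core invariant: on a sorted remainder, B's run scan decides "some run has length 2",
-- i.e. "some character occurs exactly twice" in consumed-run ++ remainder.
theorem runscan_eq (l : List Char) :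
    ∀ (prev : Char) (run : Nat) (double : Bool),
      1 ≤ run → List.IsChain (· ≤ ·) (prev :: l) →
      ((((prev :: l).zip l).foldl
          (fun (st : Nat × Bool) p =>
            if p.1 == p.2 then (st.1 + 1, st.2) else (1, st.2 || (st.1 == 2)))
          (run, double)).2 ||
        ((((prev :: l).zip l).foldl
          (fun (st : Nat × Bool) p =>
            if p.1 == p.2 then (st.1 + 1, st.2) else (1, st.2 || (st.1 == 2)))
          (run, double)).1 == 2)) =
      (double || anyTwice (List.replicate run prev ++ l)) := by
  induction l with
  | nil =>
    intro prev run double hrun _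
    simp only [List.zip_nil_right, List.foldl_nil, List.append_nil]
    unfold anyTwice
    simp [List.count_replicate_self, Nat.pos_iff_ne_zero.mp hrun]
  | cons c cs ih =>
    intro prev run double hrun hchain
    obtain ⟨hpc, htail⟩ := List.isChain_cons_cons.mp hchain
    by_cases h : prev = c
    · subst h
      have he : (prev == prev) = true := by simp
      simp only [List.zip_cons_cons, List.foldl_cons, he, if_true]
      rw [ih prev (run + 1) double (by omega) htail]
      have : List.replicate (run + 1) prev ++ cs = List.replicate run prev ++ (prev :: cs) := by
        rw [List.replicate_succ']; simp
      rw [this]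
    · have hlt : prev < c := lt_of_le_of_ne hpc h
      have hbs : ∀ x ∈ c :: cs, prev < x := by
        intro x hx
        rcases List.mem_cons.mp hx with rfl | hx'
        · exact hlt
        · have pw := List.isChain_iff_pairwise.mp htail
          exact lt_of_lt_of_le hlt ((List.pairwise_cons.mp pw).1 x hx')
      have hne : (prev == c) = false := by simp [h]
      simp only [List.zip_cons_cons, List.foldl_cons, hne, Bool.false_eq_true, if_false]
      rw [ih c 1 (double || (run == 2)) le_rfl htail]
      rw [anyTwice_append_run run prev (c :: cs) hbs]
      have : List.replicate 1 c ++ cs = c :: cs := by simp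
      rw [this, Bool.or_assoc]

-- the whole equivalence, stated over an arbitrary character list
theorem main_list (s : List Char) :
    (let increasing := (PySem.List.pyRange 0 ((s.length : Int) - 1) 1).foldl
        (fun inc i =>
          if PySem.List.pyGetD s i ' ' > PySem.List.pyGetD s (i + 1) ' ' then false else inc)
        true
     let double :=
       if increasing then
         s.foldl (fun d c => if s.count c == 2 then true else d) false
       else false
     if increasing && double then true else false) =
    (let pairs := s.zip (s.drop 1)
     if !(pairs.all fun p => p.1 ≤ p.2) then false
     else
       let st := pairs.foldl
         (fun (st : Nat × Bool) p =>
           if p.1 == p.2 then (st.1 + 1, st.2)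
           else (1, st.2 || (st.1 == 2)))
         (1, false)
       st.2 || (st.1 == 2)) := by
  simp only [gt_iff_lt, foldl_if_false, Bool.true_and, index_all_eq_zip_all]
  by_cases hinc : ((s.zip (s.drop 1)).all fun p => p.1 ≤ p.2) = true
  · rw [hinc]
    simp only [Bool.not_true, Bool.false_eq_true, if_false, if_true, foldl_if_true,
      Bool.false_or, Bool.true_and]
    cases s with
    | nil => simp
    | cons a t =>
      have hchain := (zip_all_iff_chain (a :: t)).mp hinc
      have hr := runscan_eq t a 1 false le_rfl hchain
      simp only [Bool.false_or] at hr
      rw [List.drop_one, List.tail_cons] at hinc ⊢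
      rw [hr]
      have : List.replicate 1 a ++ t = a :: t := by simp
      rw [this]
      unfold anyTwice
      cases h : (a :: t).any fun c => (a :: t).count c == 2 <;> simp
  · have hfalse : ((s.zip (s.drop 1)).all fun p => p.1 ≤ p.2) = false := by
      simpa using hinc
    rw [hfalse]
    simp

-- ===== VERDICT (by name: the statement is the Claim_ definition above) =====
theorem CheckCritiria2_spec : Claim_equal_CheckCritiria2 := by
  intro input _
  unfold Spec_CheckCritiria2 CheckCritiria2 CheckCritiria2_alt
  exact main_list (PySem.Int.toChars input)
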